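-- pv_equiv track=rewrite | github.com/Coldaine/ColdVox | scripts/docs_semantic_review.py | worst_policy_severity
-- ===== SOURCE A (Python) =====
-- from typing import Dict, List, Tuple
--
-- SEVERITY_ORDER = {
--     "none": 0,
--     "minor": 1,
--     "major": 2,
--     "critical": 3,
-- }
--
-- def worst_policy_severity(findings: List[Dict]) -> str:
--     if not findings:
--         return "none"
--     return max(
--         [f.get("severity", "none") for f in findings if f.get("severity") in SEVERITY_ORDER],
--         key=lambda x: SEVERITY_ORDER[x],
--         default="none",
--     )
-- ===== SOURCE B (Python) =====
-- def worst_policy_severity(findings):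
--     for level in ("critical", "major", "minor"):
--         if any(f.get("severity") == level for f in findings):
--             return level
--     return "none"
-- ===== Notes on version B (the rewrite author's own statement) =====
-- stated objective: alternative
-- what changed: Replaces the filter+max-by-severity-rank reduction with a fixed descending scan over the severity labels, returning the first label some finding carries; the rank dictionary and the max fold disappear.
import Mathlib
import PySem

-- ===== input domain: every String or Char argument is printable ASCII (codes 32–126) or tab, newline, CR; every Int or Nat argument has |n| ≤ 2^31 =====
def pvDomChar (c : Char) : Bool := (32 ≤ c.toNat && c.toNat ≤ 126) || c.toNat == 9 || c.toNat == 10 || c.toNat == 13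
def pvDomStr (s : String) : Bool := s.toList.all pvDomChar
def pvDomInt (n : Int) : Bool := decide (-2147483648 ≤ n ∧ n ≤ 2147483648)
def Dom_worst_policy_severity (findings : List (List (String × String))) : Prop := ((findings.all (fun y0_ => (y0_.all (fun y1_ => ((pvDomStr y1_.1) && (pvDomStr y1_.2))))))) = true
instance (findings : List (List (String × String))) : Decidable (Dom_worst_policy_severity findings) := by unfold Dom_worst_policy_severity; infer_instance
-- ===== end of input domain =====

-- B replaces A's filter+max-by-rank reduction by a descending scan over the severity labels (alternative decomposition, same cost).

-- ===== PORT A =====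
-- SEVERITY_ORDER
def pvSeverityOrder : PySem.Dict String Int :=
  PySem.Dict.ofList [("none", 0), ("minor", 1), ("major", 2), ("critical", 3)]

-- f.get("severity"): first-match association-list lookup (shared Python idiom of both programs)
def pvSev (f : List (String × String)) : Option String :=
  (PySem.Dict.mk f).get? "severity"

def worst_policy_severity (findings : List (List (String × String))) : String :=
  if findings = [] then "none"
  else
    PySem.List.maxD
      ((findings.filter (fun f =>
          match pvSev f with
          | some s => pvSeverityOrder.contains s
          | none => false)).map (fun f => (pvSev f).getD "none"))
      -- key = SEVERITY_ORDER[x]; the KeyError branch is unreachable: every listed value passed the membership filter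
      (fun x => pvSeverityOrder.getD x 0)
      "none"

-- ===== PORT B =====
def worst_policy_severity_alt (findings : List (List (String × String))) : String :=
  if findings.any (fun f => pvSev f == some "critical") then "critical"
  else if findings.any (fun f => pvSev f == some "major") then "major"
  else if findings.any (fun f => pvSev f == some "minor") then "minor"
  else "none"

-- ===== PRECONDITION & SPEC =====
def Spec_worst_policy_severity (findings : List (List (String × String))) (out : String) : Prop := out = worst_policy_severity_alt findings
instance (findings : List (List (String × String))) (out : String) : Decidable (Spec_worst_policy_severity findings out) := by unfold Spec_worst_policy_severity; infer_instance

-- ===== CLAIM (what is proved, stated in full; the proofs are below) =====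
def Claim_equal_worst_policy_severity : Prop := ∀ (findings : List (List (String × String))), Dom_worst_policy_severity findings → Spec_worst_policy_severity findings (worst_policy_severity findings)

-- ===== LEMMAS AND PROOFS =====

-- the list A's max ranges over, and A's key function
def pvXs (findings : List (List (String × String))) : List String :=
  (findings.filter (fun f =>
      match pvSev f with
      | some s => pvSeverityOrder.contains s
      | none => false)).map (fun f => (pvSev f).getD "none")

def pvKey : String → Int := fun x => pvSeverityOrder.getD x 0

lemma pv_worst_eq (fs : List (List (String × String))) :
    worst_policy_severity fs = if fs = [] then "none" else PySem.List.maxD (pvXs fs) pvKey "none" := rfl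

lemma pv_contains_iff (s : String) :
    pvSeverityOrder.contains s = true ↔ s = "none" ∨ s = "minor" ∨ s = "major" ∨ s = "critical" := by
  have h : pvSeverityOrder.items = [("none", 0), ("minor", 1), ("major", 2), ("critical", 3)] := by decide
  simp only [PySem.Dict.contains, h]
  simp
  tauto

lemma pv_mem_xs (L : String) (hL : pvSeverityOrder.contains L = true) (fs : List (List (String × String))) :
    L ∈ pvXs fs ↔ ∃ f ∈ fs, pvSev f = some L := by
  unfold pvXs
  constructor
  · intro h
    simp only [List.mem_map, List.mem_filter] at h
    obtain ⟨f, ⟨hf, hp⟩, hv⟩ := h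
    cases hs : pvSev f with
    | none => rw [hs] at hp; simp at hp
    | some s =>
      rw [hs] at hv; simp at hv
      exact ⟨f, hf, by rw [hs, hv]⟩
  · rintro ⟨f, hf, hs⟩
    simp only [List.mem_map, List.mem_filter]
    exact ⟨f, ⟨hf, by rw [hs]; exact hL⟩, by rw [hs]; rfl⟩

lemma pv_labels_of_mem {x : String} {fs : List (List (String × String))} (h : x ∈ pvXs fs) :
    x = "none" ∨ x = "minor" ∨ x = "major" ∨ x = "critical" := by
  unfold pvXs at h
  simp only [List.mem_map, List.mem_filter] at h
  obtain ⟨f, ⟨_, hp⟩, hv⟩ := h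
  cases hs : pvSev f with
  | none => rw [hs] at hp; simp at hp
  | some s =>
    rw [hs] at hp hv; simp at hv
    subst hv
    exact (pv_contains_iff s).mp hp

lemma pv_any_iff (fs : List (List (String × String))) (L : String) :
    fs.any (fun f => pvSev f == some L) = true ↔ ∃ f ∈ fs, pvSev f = some L := by
  simp

lemma pv_main (fs : List (List (String × String))) :
    worst_policy_severity fs = worst_policy_severity_alt fs := by
  rw [pv_worst_eq]
  unfold worst_policy_severity_alt
  by_cases hc : ∃ f ∈ fs, pvSev f = some "critical"
  · have hfs : fs ≠ [] := by obtain ⟨f, hf, _⟩ := hc; rintro rfl; simp at hf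
    have hmem : "critical" ∈ pvXs fs := (pv_mem_xs _ (by decide) fs).mpr hc
    have hac : fs.any (fun f => pvSev f == some "critical") = true := (pv_any_iff fs _).mpr hc
    cases hmax : PySem.List.max? (pvXs fs) pvKey with
    | none => exact absurd ((PySem.List.max?_eq_none_iff _ _).mp hmax ▸ hmem) (List.not_mem_nil)
    | some m =>
      have hm := PySem.List.max?_mem hmax
      have h3 : pvKey "critical" ≤ pvKey m := PySem.List.max?_isMax hmax _ hmem
      have hme : m = "critical" := by
        rcases pv_labels_of_mem hm with rfl | rfl | rfl | rfl <;> revert h3 <;> decide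
      simp [PySem.List.maxD, hmax, hme, hac, hfs]
  · have hac : fs.any (fun f => pvSev f == some "critical") = false := by
      rw [← Bool.not_eq_true, pv_any_iff]; exact hc
    by_cases hM : ∃ f ∈ fs, pvSev f = some "major"
    · have hfs : fs ≠ [] := by obtain ⟨f, hf, _⟩ := hM; rintro rfl; simp at hf
      have hmem : "major" ∈ pvXs fs := (pv_mem_xs _ (by decide) fs).mpr hM
      have ham : fs.any (fun f => pvSev f == some "major") = true := (pv_any_iff fs _).mpr hM
      cases hmax : PySem.List.max? (pvXs fs) pvKey with
      | none => exact absurd ((PySem.List.max?_eq_none_iff _ _).mp hmax ▸ hmem) (List.not_mem_nil)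
      | some m =>
        have hm := PySem.List.max?_mem hmax
        have h2 : pvKey "major" ≤ pvKey m := PySem.List.max?_isMax hmax _ hmem
        have hme : m = "major" := by
          rcases pv_labels_of_mem hm with rfl | rfl | rfl | rfl
          · revert h2; decide
          · revert h2; decide
          · rfl
          · exact absurd ((pv_mem_xs _ (by decide) fs).mp hm) hc
        simp [PySem.List.maxD, hmax, hme, hac, ham, hfs]
    · have ham : fs.any (fun f => pvSev f == some "major") = false := by
        rw [← Bool.not_eq_true, pv_any_iff]; exact hM
      by_cases hmin : ∃ f ∈ fs, pvSev f = some "minor"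
      · have hfs : fs ≠ [] := by obtain ⟨f, hf, _⟩ := hmin; rintro rfl; simp at hf
        have hmem : "minor" ∈ pvXs fs := (pv_mem_xs _ (by decide) fs).mpr hmin
        have hamin : fs.any (fun f => pvSev f == some "minor") = true := (pv_any_iff fs _).mpr hmin
        cases hmax : PySem.List.max? (pvXs fs) pvKey with
        | none => exact absurd ((PySem.List.max?_eq_none_iff _ _).mp hmax ▸ hmem) (List.not_mem_nil)
        | some m =>
          have hm := PySem.List.max?_mem hmax
          have h1 : pvKey "minor" ≤ pvKey m := PySem.List.max?_isMax hmax _ hmem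
          have hme : m = "minor" := by
            rcases pv_labels_of_mem hm with rfl | rfl | rfl | rfl
            · revert h1; decide
            · rfl
            · exact absurd ((pv_mem_xs _ (by decide) fs).mp hm) hM
            · exact absurd ((pv_mem_xs _ (by decide) fs).mp hm) hc
          simp [PySem.List.maxD, hmax, hme, hac, ham, hamin, hfs]
      · have hamin : fs.any (fun f => pvSev f == some "minor") = false := by
          rw [← Bool.not_eq_true, pv_any_iff]; exact hmin
        by_cases hfs : fs = []
        · simp [hfs]
        · cases hmax : PySem.List.max? (pvXs fs) pvKey with
          | none => simp [PySem.List.maxD, hmax, hac, ham, hamin, hfs]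
          | some m =>
            have hm := PySem.List.max?_mem hmax
            have hme : m = "none" := by
              rcases pv_labels_of_mem hm with rfl | rfl | rfl | rfl
              · rfl
              · exact absurd ((pv_mem_xs _ (by decide) fs).mp hm) hmin
              · exact absurd ((pv_mem_xs _ (by decide) fs).mp hm) hM
              · exact absurd ((pv_mem_xs _ (by decide) fs).mp hm) hc
            simp [PySem.List.maxD, hmax, hme, hac, ham, hamin, hfs]

-- ===== VERDICT (by name: the statement is the Claim_ definition above) =====
theorem worst_policy_severity_spec : Claim_equal_worst_policy_severity := by
  intro fs _
  unfold Spec_worst_policy_severity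
  exact pv_main fs
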